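-- pv_equiv track=rewrite | github.com/GhostXX44/password-audit-toolkit | dictionary/generator.py | generate_dictionary
-- ===== SOURCE A (Python) =====
-- def leet_transform(word):
--     replacements = {
--         'a': '@',
--         's': '$',
--         'o': '0',
--         'i': '1',
--         'e': '3'
--     }
--     for k, v in replacements.items():
--         word = word.replace(k, v)
--     return word
--
-- def generate_dictionary(base_words, append_numbers=True, max_num=100):
--     wordlist = set()
--
--     for word in base_words:
--         variations = {
--             word,
--             word.lower(),
--             word.upper(),
--             word.capitalize(),
--             leet_transform(word)
--         }
--
--         for v in variations:
--             wordlist.add(v)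
--
--             if append_numbers:
--                 for i in range(max_num):
--                     wordlist.add(f"{v}{i}")
--
--     return sorted(wordlist)
-- ===== SOURCE B (Python) =====
-- def leet_transform(word):
--     replacements = {
--         'a': '@',
--         's': '$',
--         'o': '0',
--         'i': '1',
--         'e': '3'
--     }
--     for k, v in replacements.items():
--         word = word.replace(k, v)
--     return word
--
-- def _sort_dedup(xs):
--     # sorted order + adjacent-duplicate squeeze = sorted distinct elements, no set needed
--     xs = sorted(xs)
--     out = []
--     for x in xs:
--         if not out or out[-1] != x:
--             out.append(x)
--     return out
--
-- def generate_dictionary(base_words, append_numbers=True, max_num=100):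
--     # No hash set anywhere: stage 1 builds a flat candidate list of all base
--     # variations and sort-dedups it; stage 2 expands that table with number
--     # suffixes as another flat list and sort-dedups again.
--     raw = []
--     for word in base_words:
--         raw += [word, word.lower(), word.upper(),
--                 word.capitalize(), leet_transform(word)]
--     variations = _sort_dedup(raw)
--     if not append_numbers:
--         return variations
--     cands = list(variations)
--     for v in variations:
--         for i in range(max_num):
--             cands.append(f"{v}{i}")
--     return _sort_dedup(cands)
-- ===== Notes on version B (the rewrite author's own statement) =====
-- stated objective: alternative
-- what changed: Drops the hash set entirely: B builds flat candidate lists and deduplicates by sort-then-adjacent-scan, in two staged passes (all variations first, then suffix expansion of the deduplicated variation table), so number suffixes are generated once per distinct variation instead of once per (word, variation) occurrence as in A.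
import Mathlib
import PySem

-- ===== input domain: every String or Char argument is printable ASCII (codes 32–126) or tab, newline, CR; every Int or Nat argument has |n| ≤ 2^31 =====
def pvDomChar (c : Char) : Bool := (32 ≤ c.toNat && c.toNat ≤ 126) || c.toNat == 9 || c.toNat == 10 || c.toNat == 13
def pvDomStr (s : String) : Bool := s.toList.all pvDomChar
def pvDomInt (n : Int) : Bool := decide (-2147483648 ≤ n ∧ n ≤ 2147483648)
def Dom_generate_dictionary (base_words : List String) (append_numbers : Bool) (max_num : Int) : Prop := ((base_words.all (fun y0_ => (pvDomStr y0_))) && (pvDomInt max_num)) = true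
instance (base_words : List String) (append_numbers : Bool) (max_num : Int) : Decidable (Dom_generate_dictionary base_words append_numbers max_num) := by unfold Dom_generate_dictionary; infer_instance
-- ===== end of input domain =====

-- B drops the hash set: flat candidate lists deduplicated by sort + adjacent scan, in two staged
-- passes (all variations, then suffix expansion of the deduplicated variation table), so number
-- suffixes are generated once per distinct variation.

-- ===== PORT A =====
-- shared helper of both Pythons: leet_transform (dict iteration order = insertion order of the literal)
def leet_transform (word : String) : String :=
  [("a","@"),("s","$"),("o","0"),("i","1"),("e","3")].foldl
    (fun w kv => PySem.Str.replace w kv.1 kv.2) word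

-- str.capitalize(), ported by hand (PySem has no capitalize): first char uppercased, rest
-- lowercased — exact on ASCII (titlecase = uppercase there).
def pyCapitalize (s : String) : String :=
  match s.toList with
  | [] => ""
  | c :: rest => String.ofList (PySem.Chars.upperChar c :: PySem.Chars.lower rest)

def pvVariationList (word : String) : List String :=
  [word, PySem.Str.lower word, PySem.Str.upper word, pyCapitalize word, leet_transform word]

-- body of A's 'for v in variations' loop (iterated over a Set, result order-independent)
def pvAddV (append_numbers : Bool) (max_num : Int)
    (wordlist : PySem.Set String) (v : String) : PySem.Set String :=
  let wordlist := PySem.Set.add wordlist v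
  if append_numbers then
    (PySem.List.pyRange 0 max_num 1).foldl
      (fun wl i => PySem.Set.add wl (v ++ PySem.Int.toStr i)) wordlist
  else wordlist

def generate_dictionary (base_words : List String) (append_numbers : Bool) (max_num : Int) : List String :=
  let wordlist : PySem.Set String :=
    base_words.foldl
      (fun wl word =>
        let variations := PySem.Set.ofList (pvVariationList word)
        variations.foldl (pvAddV append_numbers max_num) wl)
      PySem.Set.empty
  PySem.List.sorted wordlist (fun x => x) false

-- ===== PORT B =====
-- Source B's _sort_dedup: sorted(), then the append-if-not-last loop
def pvSortDedupStep (out : List String) (x : String) : List String :=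
  if out.getLast? = some x then out else out ++ [x]

def pvSortDedup (xs : List String) : List String :=
  (PySem.List.sorted xs (fun x => x) false).foldl pvSortDedupStep []

def generate_dictionary_alt (base_words : List String) (append_numbers : Bool) (max_num : Int) : List String :=
  let raw : List String :=
    base_words.foldl (fun acc word => acc ++ pvVariationList word) []
  let variations := pvSortDedup raw
  if append_numbers = false then variations
  else
    let cands : List String :=
      variations.foldl
        (fun acc v =>
          (PySem.List.pyRange 0 max_num 1).foldl
            (fun acc i => acc ++ [v ++ PySem.Int.toStr i]) acc)
        variations
    pvSortDedup cands

-- ===== PRECONDITION & SPEC =====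
def Spec_generate_dictionary (base_words : List String) (append_numbers : Bool) (max_num : Int) (out : List String) : Prop := out = generate_dictionary_alt base_words append_numbers max_num
instance (base_words : List String) (append_numbers : Bool) (max_num : Int) (out : List String) : Decidable (Spec_generate_dictionary base_words append_numbers max_num out) := by unfold Spec_generate_dictionary; infer_instance

-- ===== CLAIM (what is proved, stated in full; the proofs are below) =====
def Claim_equal_generate_dictionary : Prop := ∀ (base_words : List String) (append_numbers : Bool) (max_num : Int), Dom_generate_dictionary base_words append_numbers max_num → Spec_generate_dictionary base_words append_numbers max_num (generate_dictionary base_words append_numbers max_num)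

-- ===== LEMMAS AND PROOFS =====

-- proof-only recursive form of the adjacent-dedup fold: skip an element equal to the previous kept one
def pvDD : Option String → List String → List String
  | _, [] => []
  | p, x :: t => if p = some x then pvDD p t else x :: pvDD (some x) t

theorem pv_foldl_dedup : ∀ (xs out : List String),
    xs.foldl pvSortDedupStep out = out ++ pvDD out.getLast? xs := by
  intro xs
  induction xs with
  | nil => intro out; simp [pvDD]
  | cons x t ih =>
    intro out
    rw [List.foldl_cons]
    by_cases h : out.getLast? = some x
    · have hstep : pvSortDedupStep out x = out := by simp [pvSortDedupStep, h]
      rw [hstep, ih out, h]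
      simp [pvDD]
    · have hstep : pvSortDedupStep out x = out ++ [x] := by simp [pvSortDedupStep, h]
      rw [hstep, ih (out ++ [x])]
      simp [pvDD, h]

theorem pv_mem_dd : ∀ (xs : List String) (p : Option String) (y : String),
    xs.Pairwise (· ≤ ·) → (∀ z ∈ xs, ∀ a, p = some a → a ≤ z) →
    (y ∈ pvDD p xs ↔ y ∈ xs ∧ p ≠ some y) := by
  intro xs
  induction xs with
  | nil => intro p y _ _; simp [pvDD]
  | cons x t ih =>
    intro p y hpw hlb
    have hxt : ∀ z ∈ t, x ≤ z := (List.pairwise_cons.mp hpw).1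
    have hpwt := (List.pairwise_cons.mp hpw).2
    by_cases h : p = some x
    · simp only [pvDD, if_pos h]
      rw [ih p y hpwt (fun z hz => hlb z (List.mem_cons_of_mem _ hz))]
      constructor
      · rintro ⟨hy, hne⟩; exact ⟨List.mem_cons_of_mem _ hy, hne⟩
      · rintro ⟨hy, hne⟩
        rcases List.mem_cons.mp hy with rfl | hy
        · exact absurd h hne
        · exact ⟨hy, hne⟩
    · simp only [pvDD, if_neg h]
      rw [List.mem_cons, ih (some x) y hpwt (fun z hz a ha => by cases ha; exact hxt z hz)]
      constructor
      · rintro (rfl | ⟨hy, hne⟩)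
        · exact ⟨List.mem_cons_self, fun hp => h hp⟩
        · refine ⟨List.mem_cons_of_mem _ hy, ?_⟩
          intro hp
          rcases hp with rfl
          -- p = some y, y ∈ t, y ≠ x; but the lower bound gives y ≤ x and x ≤ y
          have h1 : y ≤ x := hlb x List.mem_cons_self y rfl
          have h2 : x ≤ y := hxt y hy
          have hxy : x = y := le_antisymm h2 h1
          exact hne (congrArg some hxy)
      · rintro ⟨hy, hne⟩
        rcases List.mem_cons.mp hy with rfl | hy
        · exact Or.inl rfl
        · by_cases hxy : y = x
          · exact Or.inl hxy
          · exact Or.inr ⟨hy, fun hc => hxy (by cases hc; rfl)⟩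

theorem pv_pairwise_dd : ∀ (xs : List String) (p : Option String),
    xs.Pairwise (· ≤ ·) → (∀ z ∈ xs, ∀ a, p = some a → a ≤ z) →
    (pvDD p xs).Pairwise (· < ·) := by
  intro xs
  induction xs with
  | nil => intro p _ _; simp [pvDD]
  | cons x t ih =>
    intro p hpw hlb
    have hxt : ∀ z ∈ t, x ≤ z := (List.pairwise_cons.mp hpw).1
    have hpwt := (List.pairwise_cons.mp hpw).2
    by_cases h : p = some x
    · simp only [pvDD, if_pos h]
      exact ih p hpwt (fun z hz => hlb z (List.mem_cons_of_mem _ hz))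
    · simp only [pvDD, if_neg h]
      refine List.pairwise_cons.mpr ⟨?_, ?_⟩
      · intro y hy
        have := (pv_mem_dd t (some x) y hpwt
          (fun z hz a ha => by cases ha; exact hxt z hz)).mp hy
        exact lt_of_le_of_ne (hxt y this.1) (fun hc => this.2 (congrArg some hc))
      · exact ih (some x) hpwt (fun z hz a ha => by cases ha; exact hxt z hz)

theorem pv_sortDedup_eq (xs : List String) :
    pvSortDedup xs = pvDD none (PySem.List.sorted xs (fun x => x) false) := by
  unfold pvSortDedup
  rw [pv_foldl_dedup]
  simp

theorem pv_mem_sortDedup (xs : List String) (y : String) :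
    y ∈ pvSortDedup xs ↔ y ∈ xs := by
  rw [pv_sortDedup_eq,
    pv_mem_dd _ none y (PySem.List.sorted_pairwise xs (fun x => x)) (by simp)]
  simp [PySem.List.mem_sorted]

theorem pv_pairwise_sortDedup (xs : List String) :
    (pvSortDedup xs).Pairwise (· < ·) := by
  rw [pv_sortDedup_eq]
  exact pv_pairwise_dd _ none (PySem.List.sorted_pairwise xs (fun x => x)) (by simp)

-- a fold preserves any invariant its step preserves
theorem pv_foldl_preserve {α β : Type} (f : α → β → α) (P : α → Prop)
    (h : ∀ s b, P s → P (f s b)) : ∀ (l : List β) (s : α), P s → P (l.foldl f s) := by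
  intro l
  induction l with
  | nil => intro s hs; exact hs
  | cons b t ih => intro s hs; exact ih _ (h s b hs)

theorem pv_mem_foldl_addV {an : Bool} {mn : Int} :
    ∀ (ys : List String) (wl : PySem.Set String) (x : String),
      x ∈ ys.foldl (pvAddV an mn) wl ↔
        x ∈ wl ∨ ∃ v ∈ ys, x = v ∨ (an = true ∧
          ∃ i ∈ PySem.List.pyRange 0 mn 1, x = v ++ PySem.Int.toStr i) := by
  intro ys
  induction ys with
  | nil => intro wl x; simp
  | cons v t ih =>
    intro wl x
    simp only [List.foldl_cons, ih, List.mem_cons]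
    constructor
    · rintro (hx | ⟨w, hw, hQ⟩)
      · unfold pvAddV at hx
        by_cases han : an = true
        · simp only [han, if_true] at hx
          rw [PySem.Set.mem_foldl_add] at hx
          rcases hx with hx | ⟨i, hi, hxi⟩
          · rw [PySem.Set.mem_add] at hx
            rcases hx with hx | hx
            · exact Or.inl hx
            · exact Or.inr ⟨v, Or.inl rfl, Or.inl hx⟩
          · exact Or.inr ⟨v, Or.inl rfl, Or.inr ⟨han, i, hi, hxi⟩⟩
        · simp only [if_neg han] at hx
          rw [PySem.Set.mem_add] at hx
          rcases hx with hx | hx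
          · exact Or.inl hx
          · exact Or.inr ⟨v, Or.inl rfl, Or.inl hx⟩
      · exact Or.inr ⟨w, Or.inr hw, hQ⟩
    · rintro (hx | ⟨w, (rfl | hw), hQ⟩)
      · refine Or.inl ?_
        unfold pvAddV
        by_cases han : an = true
        · simp only [han, if_true]
          rw [PySem.Set.mem_foldl_add, PySem.Set.mem_add]
          exact Or.inl (Or.inl hx)
        · simp only [if_neg han]
          rw [PySem.Set.mem_add]
          exact Or.inl hx
      · refine Or.inl ?_
        unfold pvAddV
        rcases hQ with rfl | ⟨han, i, hi, hxi⟩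
        · by_cases han : an = true
          · simp only [han, if_true]
            rw [PySem.Set.mem_foldl_add, PySem.Set.mem_add]
            exact Or.inl (Or.inr rfl)
          · simp only [if_neg han]
            rw [PySem.Set.mem_add]
            exact Or.inr rfl
        · simp only [han, if_true]
          rw [PySem.Set.mem_foldl_add]
          exact Or.inr ⟨i, hi, hxi⟩
      · exact Or.inr ⟨w, hw, hQ⟩

-- membership in A's accumulated wordlist
theorem pv_mem_A {an : Bool} {mn : Int} :
    ∀ (bw : List String) (wl : PySem.Set String) (x : String),
      x ∈ bw.foldl (fun wl word =>
            (PySem.Set.ofList (pvVariationList word)).foldl (pvAddV an mn) wl) wl ↔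
        x ∈ wl ∨ ∃ w ∈ bw, ∃ v ∈ pvVariationList w, x = v ∨ (an = true ∧
          ∃ i ∈ PySem.List.pyRange 0 mn 1, x = v ++ PySem.Int.toStr i) := by
  intro bw
  induction bw with
  | nil => intro wl x; simp
  | cons w t ih =>
    intro wl x
    simp only [List.foldl_cons, ih, pv_mem_foldl_addV, PySem.Set.mem_ofList, List.mem_cons]
    constructor
    · rintro ((hx | ⟨v, hv, hQ⟩) | ⟨w', hw', hrest⟩)
      · exact Or.inl hx
      · exact Or.inr ⟨w, Or.inl rfl, v, hv, hQ⟩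
      · exact Or.inr ⟨w', Or.inr hw', hrest⟩
    · rintro (hx | ⟨w', (rfl | hw'), hrest⟩)
      · exact Or.inl (Or.inl hx)
      · exact Or.inl (Or.inr hrest)
      · exact Or.inr ⟨w', hw', hrest⟩

theorem pv_nodup_addV {an : Bool} {mn : Int} (wl : PySem.Set String) (v : String)
    (h : wl.Nodup) : (pvAddV an mn wl v).Nodup := by
  unfold pvAddV
  by_cases han : an = true
  · simp only [han, if_true]
    exact pv_foldl_preserve _ List.Nodup (fun s b hs => PySem.Set.nodup_add _ _ hs) _ _
      (PySem.Set.nodup_add _ _ h)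
  · simp only [if_neg han]
    exact PySem.Set.nodup_add _ _ h

theorem pv_nodup_A (bw : List String) (an : Bool) (mn : Int) :
    (bw.foldl (fun wl word =>
        (PySem.Set.ofList (pvVariationList word)).foldl (pvAddV an mn) wl)
      PySem.Set.empty).Nodup := by
  refine pv_foldl_preserve _ List.Nodup (fun s w hs => ?_) _ _ List.nodup_nil
  exact pv_foldl_preserve _ List.Nodup (fun s v hs => pv_nodup_addV s v hs) _ _ hs

-- membership in B's flat raw list
theorem pv_mem_raw :
    ∀ (bw : List String) (acc : List String) (x : String),
      x ∈ bw.foldl (fun acc word => acc ++ pvVariationList word) acc ↔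
        x ∈ acc ∨ ∃ w ∈ bw, x ∈ pvVariationList w := by
  intro bw
  induction bw with
  | nil => intro acc x; simp
  | cons w t ih =>
    intro acc x
    simp only [List.foldl_cons, ih, List.mem_append, List.mem_cons]
    constructor
    · rintro ((hx | hx) | ⟨w', hw', hx⟩)
      · exact Or.inl hx
      · exact Or.inr ⟨w, Or.inl rfl, hx⟩
      · exact Or.inr ⟨w', Or.inr hw', hx⟩
    · rintro (hx | ⟨w', (rfl | hw'), hx⟩)
      · exact Or.inl (Or.inl hx)
      · exact Or.inl (Or.inr hx)
      · exact Or.inr ⟨w', hw', hx⟩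

-- membership in B's suffix-appending loops
theorem pv_mem_cands {mn : Int} :
    ∀ (V : List String) (acc : List String) (x : String),
      x ∈ V.foldl (fun acc v =>
            (PySem.List.pyRange 0 mn 1).foldl
              (fun acc i => acc ++ [v ++ PySem.Int.toStr i]) acc) acc ↔
        x ∈ acc ∨ ∃ v ∈ V, ∃ i ∈ PySem.List.pyRange 0 mn 1, x = v ++ PySem.Int.toStr i := by
  have inner : ∀ (v : String) (l : List Int) (acc : List String) (x : String),
      x ∈ l.foldl (fun acc i => acc ++ [v ++ PySem.Int.toStr i]) acc ↔
        x ∈ acc ∨ ∃ i ∈ l, x = v ++ PySem.Int.toStr i := by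
    intro v l
    induction l with
    | nil => intro acc x; simp
    | cons i t ih =>
      intro acc x
      simp only [List.foldl_cons, ih, List.mem_append, List.mem_cons, List.not_mem_nil,
        or_false]
      constructor
      · rintro ((hx | hx) | ⟨j, hj, hx⟩)
        · exact Or.inl hx
        · exact Or.inr ⟨i, Or.inl rfl, hx⟩
        · exact Or.inr ⟨j, Or.inr hj, hx⟩
      · rintro (hx | ⟨j, (rfl | hj), hx⟩)
        · exact Or.inl (Or.inl hx)
        · exact Or.inl (Or.inr hx)
        · exact Or.inr ⟨j, hj, hx⟩
  intro V
  induction V with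
  | nil => intro acc x; simp
  | cons v t ih =>
    intro acc x
    simp only [List.foldl_cons, ih, inner, List.mem_cons]
    constructor
    · rintro ((hx | ⟨i, hi, hx⟩) | ⟨v', hv', hx⟩)
      · exact Or.inl hx
      · exact Or.inr ⟨v, Or.inl rfl, i, hi, hx⟩
      · exact Or.inr ⟨v', Or.inr hv', hx⟩
    · rintro (hx | ⟨v', (rfl | hv'), hx⟩)
      · exact Or.inl (Or.inl hx)
      · exact Or.inl (Or.inr hx)
      · exact Or.inr ⟨v', hv', hx⟩

-- two strictly increasing String lists with the same members are equal
theorem pv_eq_of_pairwise_lt_of_mem {l₁ l₂ : List String}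
    (h₁ : l₁.Pairwise (· < ·)) (h₂ : l₂.Pairwise (· < ·))
    (hmem : ∀ x, x ∈ l₁ ↔ x ∈ l₂) : l₁ = l₂ := by
  have n₁ : l₁.Nodup := h₁.imp (fun h => ne_of_lt h)
  have n₂ : l₂.Nodup := h₂.imp (fun h => ne_of_lt h)
  exact List.Perm.eq_of_pairwise (fun _ _ _ _ h1 h2 => absurd h2 (lt_asymm h1)) h₁ h₂
    ((List.perm_ext_iff_of_nodup n₁ n₂).mpr hmem)

-- ===== VERDICT (by name: the statement is the Claim_ definition above) =====
theorem generate_dictionary_spec : Claim_equal_generate_dictionary := by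
  intro bw an mn _
  unfold Spec_generate_dictionary generate_dictionary generate_dictionary_alt
  set wlA := bw.foldl (fun wl word =>
      (PySem.Set.ofList (pvVariationList word)).foldl (pvAddV an mn) wl)
      PySem.Set.empty with hwlA
  -- A's output is strictly increasing with the same members as wlA
  have hApw : (PySem.List.sorted wlA (fun x => x) false).Pairwise (· < ·) := by
    have hle := PySem.List.sorted_pairwise wlA (fun x => x)
    have hnd : (PySem.List.sorted wlA (fun x => x) false).Nodup :=
      (PySem.List.sorted_perm wlA (fun x => x) false).nodup_iff.mpr (pv_nodup_A bw an mn)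
    exact (hle.and hnd).imp (fun h => lt_of_le_of_ne h.1 h.2)
  have hAmem : ∀ x, x ∈ PySem.List.sorted wlA (fun x => x) false ↔ x ∈ wlA :=
    fun x => PySem.List.mem_sorted wlA (fun x => x) false x
  set raw := bw.foldl (fun acc word => acc ++ pvVariationList word) ([] : List String) with hraw
  have hrawmem : ∀ x, x ∈ raw ↔ ∃ w ∈ bw, x ∈ pvVariationList w := by
    intro x; rw [hraw, pv_mem_raw]; simp
  by_cases han : an = true
  · subst han
    simp only [Bool.true_eq_false, if_false]
    apply pv_eq_of_pairwise_lt_of_mem hApw (pv_pairwise_sortDedup _)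
    intro x
    rw [hAmem, hwlA, pv_mem_A, pv_mem_sortDedup, pv_mem_cands]
    simp only [pv_mem_sortDedup, hrawmem]
    constructor
    · rintro (hx | ⟨w, hw, v, hv, (rfl | ⟨_, i, hi, hxi⟩)⟩)
      · simp at hx
      · exact Or.inl ⟨w, hw, hv⟩
      · exact Or.inr ⟨v, ⟨w, hw, hv⟩, i, hi, hxi⟩
    · rintro (⟨w, hw, hv⟩ | ⟨v, ⟨w, hw, hv⟩, i, hi, hxi⟩)
      · exact Or.inr ⟨w, hw, x, hv, Or.inl rfl⟩
      · exact Or.inr ⟨w, hw, v, hv, Or.inr ⟨by trivial, i, hi, hxi⟩⟩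
  · have han' : an = false := by cases an <;> simp_all
    subst han'
    apply pv_eq_of_pairwise_lt_of_mem hApw (pv_pairwise_sortDedup _)
    intro x
    rw [hAmem, hwlA, pv_mem_A, pv_mem_sortDedup, hrawmem x]
    constructor
    · rintro (hx | ⟨w, hw, v, hv, (rfl | ⟨hc, _⟩)⟩)
      · simp at hx
      · exact ⟨w, hw, hv⟩
      · simp at hc
    · rintro ⟨w, hw, hv⟩
      exact Or.inr ⟨w, hw, x, hv, Or.inl rfl⟩
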